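-- pv_equiv track=rewrite | github.com/farshov/SiriusIntentPrediction | feature_extraction/content.py | get5w1h
-- ===== SOURCE A (Python) =====
-- def get5w1h(phrase):
--     """
--     :param phrase: str
--     :return: array with labels of interrogative words
--     """
--     mapping = {'what': 0,
--                'where': 1,
--                'how': 2,
--                'when': 3,
--                'why': 4,
--                'who': 5}
--
--     labels = [0] * len(mapping)
--     phrase = set(phrase.split())
--     for word in mapping:
--         if word in phrase:
--             labels[mapping[word]] = 1
--     return labels
-- ===== SOURCE B (Python) =====
-- def get5w1h(phrase):
--     """
--     :param phrase: str
--     :return: array with labels of interrogative words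
--     """
--     mapping = {'what': 0,
--                'where': 1,
--                'how': 2,
--                'when': 3,
--                'why': 4,
--                'who': 5}
--
--     labels = [0] * len(mapping)
--     for token in phrase.split():
--         if token in mapping:
--             labels[mapping[token]] = 1
--     return labels
-- ===== Notes on version B (the rewrite author's own statement) =====
-- stated objective: simpler
-- what changed: B inverts the traversal: instead of materialising a set of the phrase's tokens and scanning the six fixed keys against it, it makes a single pass over the tokens themselves, looking each up in the mapping and flagging its slot; the set construction disappears.
import Mathlib
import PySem

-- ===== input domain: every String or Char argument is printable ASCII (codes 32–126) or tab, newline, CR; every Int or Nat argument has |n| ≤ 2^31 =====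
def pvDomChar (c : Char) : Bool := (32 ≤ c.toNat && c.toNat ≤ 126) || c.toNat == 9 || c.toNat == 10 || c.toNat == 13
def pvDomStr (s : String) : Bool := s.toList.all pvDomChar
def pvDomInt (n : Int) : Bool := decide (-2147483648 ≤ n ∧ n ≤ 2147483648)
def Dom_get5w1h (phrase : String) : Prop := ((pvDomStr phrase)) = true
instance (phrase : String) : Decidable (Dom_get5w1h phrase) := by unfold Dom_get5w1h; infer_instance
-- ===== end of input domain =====

-- B replaces A's "build a set of the tokens, then scan the six keys against it" by a single
-- direct pass over the tokens that flags each token's slot via the mapping (objective: simpler).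

-- the literal dict both Pythons define
def pvMapping : PySem.Dict String Int :=
  PySem.Dict.ofList [("what", 0), ("where", 1), ("how", 2), ("when", 3), ("why", 4), ("who", 5)]

-- ===== PORT A =====
-- labels[mapping[word]] = 1 : word comes from mapping's own keys, so mapping[word] never raises;
-- ported as getD with an unused default.
def get5w1h (phrase : String) : List Int :=
  let labels : List Int := List.replicate pvMapping.size 0
  let phraseSet : PySem.Set String := PySem.Set.ofList (PySem.Str.split₀ phrase)
  pvMapping.keys.foldl
    (fun labels word =>
      if PySem.Set.contains phraseSet word then
        PySem.List.pySetD labels (pvMapping.getD word 0) 1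
      else labels)
    labels

-- ===== PORT B =====
def get5w1h_alt (phrase : String) : List Int :=
  let labels : List Int := List.replicate pvMapping.size 0
  (PySem.Str.split₀ phrase).foldl
    (fun labels token =>
      match pvMapping.get? token with
      | some i => PySem.List.pySetD labels i 1
      | none => labels)
    labels

-- ===== PRECONDITION & SPEC =====
def Spec_get5w1h (phrase : String) (out : List Int) : Prop := out = get5w1h_alt phrase
instance (phrase : String) (out : List Int) : Decidable (Spec_get5w1h phrase out) := by unfold Spec_get5w1h; infer_instance

-- ===== CLAIM (what is proved, stated in full; the proofs are below) =====
def Claim_equal_get5w1h : Prop := ∀ (phrase : String), Dom_get5w1h phrase → Spec_get5w1h phrase (get5w1h phrase)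

-- ===== LEMMAS AND PROOFS =====

-- the common normal form: one 0/1 flag per interrogative word, by membership in the token list
def pvFlag (toks : List String) (w : String) : Int := if w ∈ toks then 1 else 0

lemma pvA_eq (toks : List String) :
    (["what", "where", "how", "when", "why", "who"] : List String).foldl
      (fun labels word =>
        if PySem.Set.contains (PySem.Set.ofList toks) word then
          PySem.List.pySetD labels (pvMapping.getD word 0) 1
        else labels)
      [0, 0, 0, 0, 0, 0] =
    [pvFlag toks "what", pvFlag toks "where", pvFlag toks "how",
     pvFlag toks "when", pvFlag toks "why", pvFlag toks "who"] := by
  simp only [List.foldl, PySem.Set.contains_eq_decide, PySem.Set.mem_ofList, pvFlag]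
  by_cases h1 : "what" ∈ toks <;> by_cases h2 : "where" ∈ toks <;>
    by_cases h3 : "how" ∈ toks <;> by_cases h4 : "when" ∈ toks <;>
    by_cases h5 : "why" ∈ toks <;> by_cases h6 : "who" ∈ toks <;>
    (simp only [h1, h2, h3, h4, h5, h6, decide_true, decide_false, if_true, if_false]) <;> rfl

lemma pvB_eq (toks : List String) (a b c d e f : Int) :
    toks.foldl
      (fun labels token =>
        match pvMapping.get? token with
        | some i => PySem.List.pySetD labels i 1
        | none => labels)
      [a, b, c, d, e, f] =
    [if "what" ∈ toks then 1 else a, if "where" ∈ toks then 1 else b,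
     if "how" ∈ toks then 1 else c, if "when" ∈ toks then 1 else d,
     if "why" ∈ toks then 1 else e, if "who" ∈ toks then 1 else f] := by
  induction toks generalizing a b c d e f with
  | nil => simp
  | cons t ts ih =>
    rw [List.foldl_cons]
    by_cases h1 : t = "what"
    · subst h1
      rw [show (match pvMapping.get? "what" with
          | some i => PySem.List.pySetD [a, b, c, d, e, f] i 1
          | none => [a, b, c, d, e, f]) = [1, b, c, d, e, f] from rfl, ih]
      simp
    by_cases h2 : t = "where"
    · subst h2
      rw [show (match pvMapping.get? "where" with
          | some i => PySem.List.pySetD [a, b, c, d, e, f] i 1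
          | none => [a, b, c, d, e, f]) = [a, 1, c, d, e, f] from rfl, ih]
      simp
    by_cases h3 : t = "how"
    · subst h3
      rw [show (match pvMapping.get? "how" with
          | some i => PySem.List.pySetD [a, b, c, d, e, f] i 1
          | none => [a, b, c, d, e, f]) = [a, b, 1, d, e, f] from rfl, ih]
      simp
    by_cases h4 : t = "when"
    · subst h4
      rw [show (match pvMapping.get? "when" with
          | some i => PySem.List.pySetD [a, b, c, d, e, f] i 1
          | none => [a, b, c, d, e, f]) = [a, b, c, 1, e, f] from rfl, ih]
      simp
    by_cases h5 : t = "why"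
    · subst h5
      rw [show (match pvMapping.get? "why" with
          | some i => PySem.List.pySetD [a, b, c, d, e, f] i 1
          | none => [a, b, c, d, e, f]) = [a, b, c, d, 1, f] from rfl, ih]
      simp
    by_cases h6 : t = "who"
    · subst h6
      rw [show (match pvMapping.get? "who" with
          | some i => PySem.List.pySetD [a, b, c, d, e, f] i 1
          | none => [a, b, c, d, e, f]) = [a, b, c, d, e, 1] from rfl, ih]
      simp
    · have hnone : pvMapping.get? t = none := by
        simp [show pvMapping = PySem.Dict.mk
          [("what", 0), ("where", 1), ("how", 2), ("when", 3), ("why", 4), ("who", 5)] from rfl,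
          Ne.symm h1, Ne.symm h2, Ne.symm h3, Ne.symm h4,
          Ne.symm h5, Ne.symm h6, PySem.Dict.get?]
      rw [show (match pvMapping.get? t with
          | some i => PySem.List.pySetD [a, b, c, d, e, f] i 1
          | none => [a, b, c, d, e, f]) = [a, b, c, d, e, f] from by rw [hnone], ih]
      simp [List.mem_cons, Ne.symm h1, Ne.symm h2, Ne.symm h3, Ne.symm h4, Ne.symm h5, Ne.symm h6]

-- ===== VERDICT (by name: the statement is the Claim_ definition above) =====
theorem get5w1h_spec : Claim_equal_get5w1h := by
  intro phrase _
  unfold Spec_get5w1h get5w1h get5w1h_alt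
  have hkeys : pvMapping.keys = ["what", "where", "how", "when", "why", "who"] := rfl
  have hsize : List.replicate pvMapping.size (0 : Int) = [0, 0, 0, 0, 0, 0] := rfl
  rw [hkeys, hsize, pvA_eq, pvB_eq]
  simp [pvFlag]
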